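-- pv_equiv track=rewrite | github.com/ColeDavis99/CS_5001_HW5_SUPER | HW5.py | cleanNodeName
-- ===== SOURCE A (Python) =====
-- def cleanNodeName(n):
--     newName = ""
--     for char in n:
--         if(char == ","):
--             newName += ""
--         elif(char == ";"):
--             newName += ""
--         elif(char == " "):
--             newName += "_"
--         else:
--             newName += char
--     newName += "_GROUP"
--
--     return newName
-- ===== SOURCE B (Python) =====
-- def cleanNodeName(n):
--     stripped = n.replace(",", "").replace(";", "")
--     return "_".join(stripped.split(" ")) + "_GROUP"
-- ===== Notes on version B (the rewrite author's own statement) =====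
-- stated objective: faster
-- what changed: Replaces the per-character loop with a four-way branch cascade by a staged whole-string pipeline: two replace passes delete the commas and the semicolons, then split-on-space joined with underscore turns every space into an underscore, and the suffix is appended once.
import Mathlib
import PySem

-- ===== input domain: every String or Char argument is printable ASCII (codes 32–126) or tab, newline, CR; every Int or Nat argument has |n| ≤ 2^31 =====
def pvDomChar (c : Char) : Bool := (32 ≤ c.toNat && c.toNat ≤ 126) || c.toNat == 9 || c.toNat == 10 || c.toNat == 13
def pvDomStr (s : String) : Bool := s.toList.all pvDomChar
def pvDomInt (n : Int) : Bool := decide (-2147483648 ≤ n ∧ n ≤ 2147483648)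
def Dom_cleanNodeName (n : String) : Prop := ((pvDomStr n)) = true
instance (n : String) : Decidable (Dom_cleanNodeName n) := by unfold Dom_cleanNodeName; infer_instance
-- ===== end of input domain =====

-- B replaces A's per-character loop and branch cascade by a staged whole-string
-- pipeline (two delete-replaces, then split-on-space joined with '_'), measured faster.

-- ===== PORT A =====
-- literal port of A's per-character loop with a string accumulator
def cleanNodeNameStep (acc : String) (c : Char) : String :=
  if c = ',' then acc ++ ""
  else if c = ';' then acc ++ ""
  else if c = ' ' then acc ++ "_"
  else acc ++ String.ofList [c]

def cleanNodeName (n : String) : String :=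
  (n.toList.foldl cleanNodeNameStep "") ++ "_GROUP"

-- ===== PORT B =====
-- Source B: stripped = n.replace(",", "").replace(";", ""); "_".join(stripped.split(" ")) + "_GROUP"
def cleanNodeName_alt (n : String) : String :=
  let stripped := PySem.Str.replace (PySem.Str.replace n "," "") ";" ""
  PySem.Str.join "_" ((PySem.Str.split? stripped " ").getD []) ++ "_GROUP"

-- ===== PRECONDITION & SPEC =====
def Spec_cleanNodeName (n : String) (out : String) : Prop := out = cleanNodeName_alt n
instance (n : String) (out : String) : Decidable (Spec_cleanNodeName n out) := by unfold Spec_cleanNodeName; infer_instance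

-- ===== CLAIM =====
def Claim_equal_cleanNodeName : Prop := ∀ (n : String), Dom_cleanNodeName n → Spec_cleanNodeName n (cleanNodeName n)

-- ===== LEMMAS AND PROOFS =====
-- the per-character effect of A's branch cascade, as an Option map
def cleanNodeNameTable (c : Char) : Option Char :=
  if c = ',' then none
  else if c = ';' then none
  else if c = ' ' then some '_'
  else some c

theorem cleanNodeName_foldl (l : List Char) (acc : String) :
    l.foldl cleanNodeNameStep acc = acc ++ String.ofList (l.filterMap cleanNodeNameTable) := by
  induction l generalizing acc with
  | nil => simp
  | cons c t ih =>
    rw [List.foldl_cons, List.filterMap_cons, ih]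
    unfold cleanNodeNameStep cleanNodeNameTable
    split_ifs <;> (apply String.toList_inj.mp; simp)

-- replace of a single char by "" is a filter
theorem replace_go_single (x : Char) (l acc : List Char) (fuel : Nat) (h : l.length ≤ fuel) :
    PySem.Chars.replace.go [x] [] fuel l acc = acc.reverse ++ l.filter (· ≠ x) := by
  induction l generalizing acc fuel with
  | nil => rw [PySem.Chars.replace.go.eq_def]; cases fuel <;> simp
  | cons c t ih =>
    cases fuel with
    | zero => simp at h
    | succ f =>
      have ht : t.length ≤ f := by simp only [List.length_cons] at h; omega
      rw [PySem.Chars.replace.go.eq_def]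
      by_cases hc : x = c
      · subst hc; simp [List.isPrefixOf, ih acc f ht]
      · have hc' : ¬ c = x := fun hcc => hc hcc.symm
        simp [List.isPrefixOf, hc, hc', ih (c :: acc) f ht]

theorem replace_single (x : Char) (l : List Char) :
    PySem.Chars.replace l [x] [] = l.filter (· ≠ x) := by
  unfold PySem.Chars.replace
  simp [replace_go_single x l [] l.length le_rfl]

-- the pieces splitOn produces for a single-char separator
def sPcs (x : Char) : List Char → List Char → List (List Char)
  | [], cur => [cur.reverse]
  | c :: t, cur => if c = x then cur.reverse :: sPcs x t [] else sPcs x t (c :: cur)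

theorem sPcs_ne_nil (x : Char) (l cur : List Char) : sPcs x l cur ≠ [] := by
  induction l generalizing cur with
  | nil => simp [sPcs]
  | cons c t ih => by_cases hc : c = x <;> simp [sPcs, hc, ih]

theorem splitOn_go_single (x : Char) (l cur : List Char) (acc : List (List Char)) (fuel : Nat)
    (h : l.length ≤ fuel) :
    PySem.Chars.splitOn.go [x] fuel l cur acc = acc.reverse ++ sPcs x l cur := by
  induction l generalizing cur acc fuel with
  | nil => rw [PySem.Chars.splitOn.go.eq_def]; cases fuel <;> simp [sPcs]
  | cons c t ih =>
    cases fuel with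
    | zero => simp at h
    | succ f =>
      have ht : t.length ≤ f := by simp only [List.length_cons] at h; omega
      rw [PySem.Chars.splitOn.go.eq_def]
      by_cases hc : x = c
      · subst hc; simp [List.isPrefixOf, sPcs, ih [] (cur.reverse :: acc) f ht]
      · have hc' : ¬ c = x := fun hcc => hc hcc.symm
        simp [List.isPrefixOf, hc, hc', sPcs, ih (c :: cur) acc f ht]

theorem join_sPcs (x r : Char) (l cur : List Char) :
    PySem.Chars.join [r] (sPcs x l cur)
      = cur.reverse ++ l.map (fun c => if c = x then r else c) := by
  induction l generalizing cur with
  | nil => simp [sPcs, PySem.Chars.join_singleton]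
  | cons c t ih =>
    by_cases hc : c = x
    · obtain ⟨q, rest, hq⟩ := List.exists_cons_of_ne_nil (sPcs_ne_nil x t [])
      have hstep : sPcs x (c :: t) cur = cur.reverse :: sPcs x t [] := by simp [sPcs, hc]
      rw [hstep, hq, PySem.Chars.join_cons_cons, ← hq, ih]
      simp [hc]
    · have hstep : sPcs x (c :: t) cur = sPcs x t (c :: cur) := by simp [sPcs, hc]
      rw [hstep, ih]
      simp [hc]

theorem splitOn_single (x : Char) (l : List Char) :
    PySem.Chars.splitOn l [x] = sPcs x l [] := by
  unfold PySem.Chars.splitOn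
  rw [splitOn_go_single _ _ _ _ _ (Nat.le_succ _)]
  simp

-- the staged pipeline equals A's single-pass filterMap
theorem pipeline_eq_filterMap (l : List Char) :
    (((l.filter (fun c => !decide (c = ','))).filter (fun c => !decide (c = ';'))).map
        (fun c => if c = ' ' then '_' else c))
      = l.filterMap cleanNodeNameTable := by
  induction l with
  | nil => simp
  | cons c t ih =>
    simp only [List.filter_cons, List.filterMap_cons]
    by_cases h1 : c = ','
    · simp [cleanNodeNameTable, h1, ih, -List.filter_filter]
    · by_cases h2 : c = ';'
      · simp [cleanNodeNameTable, h2, ih, -List.filter_filter]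
      · by_cases h3 : c = ' '
        · simp [cleanNodeNameTable, h3, ih, -List.filter_filter]
        · simp [cleanNodeNameTable, h1, h2, h3, ih, -List.filter_filter]

-- ===== VERDICT =====
theorem cleanNodeName_spec : Claim_equal_cleanNodeName := by
  intro n _
  unfold Spec_cleanNodeName cleanNodeName cleanNodeName_alt
  rw [cleanNodeName_foldl]
  apply String.toList_inj.mp
  simp only [PySem.Str.split?, PySem.Str.replace, PySem.Chars.split?, PySem.Str.join]
  simp [replace_single, splitOn_single, join_sPcs, Function.comp_def, -List.filter_filter]
  exact (pipeline_eq_filterMap n.toList).symm
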